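-- pv_equiv track=rewrite | github.com/BX-bot-ecosystem/TELEGRAM-BX-BOT | src/BX-Telegram.py | create_balanced_layout
-- ===== SOURCE A (Python) =====
-- import math
--
-- def create_balanced_layout(names):
--     total_members = len(names)
--     ideal_group_size = math.isqrt(total_members)
--     if names == []:
--         return None
--     remainder = total_members % ideal_group_size
--
--     groups = [names[i:i + ideal_group_size] for i in range(0, total_members - remainder, ideal_group_size)]
--
--     # Distribute the remaining members across the groups
--     for i in range(remainder):
--         groups[i].append(names[total_members - remainder + i])
--
--     return groups
-- ===== SOURCE B (Python) =====
-- import math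
--
-- def create_balanced_layout(names):
--     total = len(names)
--     size = math.isqrt(total)
--     if names == []:
--         return None
--     rem = total % size
--     base = total - rem
--     groups = [[] for _ in range(base // size)]
--     for j, name in enumerate(names):
--         g = j // size if j < base else j - base
--         groups[g].append(name)
--     return groups
-- ===== Notes on version B (the rewrite author's own statement) =====
-- stated objective: alternative
-- what changed: B replaces A's slice-then-patch construction (build all contiguous isqrt-sized slices, then a second loop mutating already-built groups with tail elements) by a single-pass bucket dispatch: it pre-creates empty groups and walks the names once, computing each element's destination group index (j // size for the first base elements, j - base for the tail) and appending it there.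
import Mathlib
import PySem

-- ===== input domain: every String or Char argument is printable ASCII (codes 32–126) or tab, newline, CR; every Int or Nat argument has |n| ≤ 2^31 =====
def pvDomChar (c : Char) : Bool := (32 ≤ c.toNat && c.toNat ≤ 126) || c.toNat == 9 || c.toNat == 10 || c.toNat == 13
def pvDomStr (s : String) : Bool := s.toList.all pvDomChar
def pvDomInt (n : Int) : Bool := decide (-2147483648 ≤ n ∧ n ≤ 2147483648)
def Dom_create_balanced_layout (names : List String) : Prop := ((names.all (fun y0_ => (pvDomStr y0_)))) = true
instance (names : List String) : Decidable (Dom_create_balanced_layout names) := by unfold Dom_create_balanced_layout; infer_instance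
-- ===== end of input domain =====

-- B replaces A's slice-then-patch construction by a single pass over the names that
-- dispatches each element into its destination group (alternative decomposition, same cost).

-- ===== PORT A =====
-- Literal port of A: slices over range(0, total - remainder, size), then a second loop
-- appending names[total - remainder + i] to groups[i] (those indices are always in range,
-- so Python never raises and pySetD/pyGetD are exact here).
def create_balanced_layout (names : List String) : Option (List (List String)) :=
  let total : Int := names.length
  let size : Int := (Nat.sqrt names.length : Int)
  if names = [] then none
  else
    let r := PySem.Int.mod total size
    let groups := (PySem.List.pyRange 0 (total - r) size).map
      (fun i => PySem.List.slice names (some i) (some (i + size)))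
    let groups2 := (PySem.List.pyRange 0 r 1).foldl
      (fun gs i => PySem.List.pySetD gs i
        (PySem.List.pyGetD gs i [] ++ [PySem.List.pyGetD names (total - r + i) ""])) groups
    some groups2

-- ===== PORT B =====
-- Literal port of B: pre-create base // size empty groups, then one fold over
-- enumerate(names) appending each element to group (j // size if j < base else j - base);
-- that index is always in range, so pySetD/pyGetD are exact here.
def create_balanced_layout_alt (names : List String) : Option (List (List String)) :=
  let total : Int := names.length
  let size : Int := (Nat.sqrt names.length : Int)
  if names = [] then none
  else
    let rem := PySem.Int.mod total size
    let base := total - rem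
    let groups0 : List (List String) :=
      (PySem.List.pyRange 0 (PySem.Int.floordiv base size) 1).map (fun _ => ([] : List String))
    some ((PySem.List.enumerate names 0).foldl (fun gs p =>
      let g := if p.1 < base then PySem.Int.floordiv p.1 size else p.1 - base
      PySem.List.pySetD gs g (PySem.List.pyGetD gs g [] ++ [p.2])) groups0)

-- ===== PRECONDITION & SPEC =====
def Spec_create_balanced_layout (names : List String) (out : Option (List (List String))) : Prop := out = create_balanced_layout_alt names
instance (names : List String) (out : Option (List (List String))) : Decidable (Spec_create_balanced_layout names out) := by unfold Spec_create_balanced_layout; infer_instance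

-- ===== CLAIM (what is proved, stated in full; the proofs are below) =====
def Claim_equal_create_balanced_layout : Prop := ∀ (names : List String), Dom_create_balanced_layout names → Spec_create_balanced_layout names (create_balanced_layout names)

-- ===== LEMMAS AND PROOFS =====

-- A's second loop over Nat indices: setting index k to (old value ++ [f k]) for each k < r
-- turns gs into its pointwise conditional-append image.
lemma pv_foldl_set_append {α : Type} (gs : List (List α)) (f : Nat → α) (r : Nat)
    (hr : r ≤ gs.length) :
    (List.range r).foldl (fun acc k => acc.set k (acc.getD k [] ++ [f k])) gs
      = gs.mapIdx (fun j x => if j < r then x ++ [f j] else x) := by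
  induction r with
  | zero =>
    apply List.ext_getElem <;> simp
  | succ r ih =>
    rw [List.range_succ, List.foldl_append, ih (by omega)]
    simp only [List.foldl_cons, List.foldl_nil]
    have hgd : (gs.mapIdx (fun j x => if j < r then x ++ [f j] else x)).getD r [] = gs[r]'(by omega) := by
      rw [List.getD_eq_getElem _ _ (by simp; omega)]
      simp
    rw [hgd]
    apply List.ext_getElem
    · simp
    · intro j hj1 hj2
      rw [List.getElem_set]
      by_cases hjr : j = r
      · subst hjr
        rw [if_pos rfl, List.getElem_mapIdx]
        simp
      · rw [if_neg (by omega : ¬ r = j)]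
        rw [List.getElem_mapIdx, List.getElem_mapIdx]
        have : j < r ↔ j < r + 1 := by omega
        simp [this]

-- B's dispatch loop: appending f j to bucket t j, for j = 0 … m-1 in order, turns gs into
-- its pointwise image where bucket i gains the f-images of the j with t j = i, in order.
lemma pv_foldl_dispatch {α : Type} (t : Nat → Nat) (f : Nat → α) (m : Nat)
    (gs : List (List α)) (ht : ∀ j, j < m → t j < gs.length) :
    (List.range m).foldl (fun acc j => acc.set (t j) (acc.getD (t j) [] ++ [f j])) gs
      = gs.mapIdx (fun i x => x ++ ((List.range m).filter (fun j => t j == i)).map f) := by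
  induction m with
  | zero =>
    apply List.ext_getElem <;> simp
  | succ m ih =>
    rw [List.range_succ, List.foldl_append, ih (fun j hj => ht j (by omega))]
    simp only [List.foldl_cons, List.foldl_nil]
    have htm : t m < gs.length := ht m (by omega)
    set G := gs.mapIdx (fun i x => x ++ ((List.range m).filter (fun j => t j == i)).map f) with hG
    have hGlen : G.length = gs.length := by simp [hG]
    have hgd : G.getD (t m) [] = G[t m]'(by omega) := by
      rw [List.getD_eq_getElem _ _ (by omega)]
    rw [hgd]
    apply List.ext_getElem
    · simp [hG]
    · intro j hj1 hj2
      rw [List.getElem_set]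
      by_cases hjm : t m = j
      · subst hjm
        rw [if_pos rfl]
        simp only [hG, List.getElem_mapIdx, List.filter_append]
        simp [List.append_assoc]
      · rw [if_neg hjm]
        simp only [hG, List.getElem_mapIdx, List.filter_append]
        simp [hjm]

-- filter (j / s = i) over range (s*q) is the i-th block of s consecutive indices.
lemma pv_filter_div (s q i : Nat) (hs : 0 < s) (hi : i < q) :
    (List.range (s * q)).filter (fun j => j / s == i)
      = (List.range s).map (fun k => i * s + k) := by
  induction q with
  | zero => omega
  | succ q ih =>
    rw [Nat.mul_succ, List.range_add, List.filter_append, List.filter_map]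
    have hdiv : ∀ k, k < s → (s * q + k) / s = q := by
      intro k hk
      rw [Nat.mul_add_div hs, Nat.div_eq_of_lt hk]
      omega
    by_cases hiq : i < q
    · rw [ih hiq]
      have : ((List.range s).filter ((fun j => j / s == i) ∘ (fun k => s * q + k))) = [] := by
        rw [List.filter_eq_nil_iff]
        intro k hk
        simp only [Function.comp_apply, beq_iff_eq]
        rw [hdiv k (List.mem_range.mp hk)]
        omega
      rw [this]
      simp
    · have hiq' : i = q := by omega
      subst hiq'
      have h1 : (List.range (s * i)).filter (fun j => j / s == i) = [] := by
        rw [List.filter_eq_nil_iff]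
        intro j hj
        have hj' : j < s * i := List.mem_range.mp hj
        have : j / s < i := (Nat.div_lt_iff_lt_mul hs).mpr (by rw [Nat.mul_comm i s]; omega)
        simp only [beq_iff_eq]
        omega
      have h2 : ((List.range s).filter ((fun j => j / s == i) ∘ (fun k => s * i + k)))
          = List.range s := by
        rw [List.filter_eq_self]
        intro k hk
        simp only [Function.comp_apply, beq_iff_eq]
        exact hdiv k (List.mem_range.mp hk)
      rw [h1, h2]
      simp only [List.nil_append]
      apply List.map_congr_left
      intro k _
      ring

-- filter (· = i) over range r.
lemma pv_filter_eq (r i : Nat) :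
    (List.range r).filter (fun k => k == i) = if i < r then [i] else [] := by
  induction r with
  | zero => simp
  | succ r ih =>
    rw [List.range_succ, List.filter_append, ih]
    by_cases h1 : i < r
    · rw [if_pos h1, if_pos (by omega)]
      have : ¬ (r = i) := by omega
      simp [this]
    · by_cases h2 : i = r
      · subst h2
        simp
      · rw [if_neg h1, if_neg (by omega)]
        have : ¬ (r = i) := by omega
        simp [this]

-- a block of s getD-reads starting at a is a drop/take slice when it fits.
lemma pv_map_getD_take (names : List String) (a s : Nat) (hle : a + s ≤ names.length) :
    (List.range s).map (fun k => names.getD (a + k) "") = (names.drop a).take s := by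
  apply List.ext_getElem
  · simp
    omega
  · intro k hk1 hk2
    simp only [List.getElem_map, List.getElem_range, List.getElem_take, List.getElem_drop]
    rw [List.getD_eq_getElem _ _ (by simp at hk1; omega)]

theorem create_balanced_layout_spec : Claim_equal_create_balanced_layout := by
  intro names _hdom
  unfold Spec_create_balanced_layout create_balanced_layout create_balanced_layout_alt
  by_cases h : names = []
  · simp [h]
  · simp only [if_neg h, PySem.Int.mod_natCast]
    set n := names.length with hn
    have hn1 : 1 ≤ n := List.length_pos_iff.mpr h
    set sN := Nat.sqrt n with hsdef
    have hs : 0 < sN := Nat.sqrt_pos.mpr hn1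
    have hsqle : sN * sN ≤ n := by rw [hsdef]; simpa [pow_two] using Nat.sqrt_le' n
    have henum : PySem.List.enumerate names 0
        = (PySem.List.pyRange 0 (n : Int) 1).map
            (fun j => (j, PySem.List.pyGetD names j "")) := by
      rw [PySem.List.enumerate_eq_map_pyRange names "", hn]
      rfl
    clear_value n sN
    clear hsdef
    set rN := n % sN with hrdef
    set qN := n / sN with hqdef
    have hdm : sN * qN + rN = n := Nat.div_add_mod n sN
    have hrs : rN < sN := Nat.mod_lt _ hs
    have hsq : sN ≤ qN := (Nat.le_div_iff_mul_le hs).mpr hsqle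
    clear_value rN qN
    clear hrdef hqdef
    have hbase : n - rN = sN * qN := by omega
    have hsub : (n : Int) - (rN : Int) = ((n - rN : Nat) : Int) := by omega
    -- the common value both sides compute: group i is its base slice plus its optional tail element
    set E : List (List String) := (List.range qN).map (fun i =>
      (names.drop (i * sN)).take sN ++
        (if i < rN then [names.getD (sN * qN + i) ""] else [])) with hE
    have hq : (n - rN) / sN = qN := by
      rw [hbase]; exact Nat.mul_div_cancel_left _ hs
    -- ===== A's two-phase construction equals E =====
    have hA : ((PySem.List.pyRange 0 ((n : Int) - (rN : Int)) (sN : Int)).map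
          (fun i => PySem.List.slice names (some i) (some (i + (sN : Int))))
        |> fun groups => (PySem.List.pyRange 0 (rN : Int) 1).foldl
          (fun gs i => PySem.List.pySetD gs i
            (PySem.List.pyGetD gs i [] ++
              [PySem.List.pyGetD names ((n : Int) - (rN : Int) + i) ""])) groups) = E := by
      simp only
      rw [hsub]
      -- A's slice list as a map over List.range qN
      have hpr : PySem.List.pyRange 0 ((n - rN : Nat) : Int) (sN : Int)
          = (List.range qN).map (fun k => ((k * sN : Nat) : Int)) := by
        rw [PySem.List.pyRange_of_pos _ _ (by exact_mod_cast hs)]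
        have hssq : sN * sN ≤ sN * qN := Nat.mul_le_mul_left _ hsq
        have hss : 1 ≤ sN * sN := Nat.mul_pos hs hs
        have hpos : (0 : Int) < ((n - rN : Nat) : Int) := by
          have : 1 ≤ n - rN := by omega
          exact_mod_cast this
        rw [if_pos hpos]
        have hcast : (((n - rN : Nat) : Int) - 0 + (sN : Int) - 1)
            = ((sN * qN + (sN - 1) : Nat) : Int) := by
          push_cast [hbase]
          omega
        have hcount : ((((n - rN : Nat) : Int) - 0 + (sN : Int) - 1) / (sN : Int)).toNat = qN := by
          rw [hcast, show ((sN * qN + (sN - 1) : Nat) : Int) / (sN : Int)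
                = (((sN * qN + (sN - 1)) / sN : Nat) : Int) by exact_mod_cast rfl]
          rw [Nat.mul_add_div hs, Int.toNat_natCast]
          have : (sN - 1) / sN = 0 := Nat.div_eq_of_lt (by omega)
          omega
        rw [hcount]
        apply List.map_congr_left
        intro k hk
        push_cast
        ring
      rw [hpr, List.map_map]
      rw [show PySem.List.pyRange 0 ((rN : Nat) : Int) 1
            = (List.range rN).map (fun k => ((k : Nat) : Int)) from PySem.List.pyRange_zero_nat rN]
      rw [List.foldl_map]
      have hfun : (fun (gs : List (List String)) (k : Nat) =>
          PySem.List.pySetD gs ((k : Nat) : Int)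
            (PySem.List.pyGetD gs ((k : Nat) : Int) [] ++
              [PySem.List.pyGetD names (((n - rN : Nat) : Int) + ((k : Nat) : Int)) ""]))
          = fun gs k => gs.set k (gs.getD k [] ++ [names.getD (n - rN + k) ""]) := by
        funext gs k
        rw [show ((n - rN : Nat) : Int) + ((k : Nat) : Int) = ((n - rN + k : Nat) : Int) by omega]
        simp only [PySem.List.pySetD_natCast, PySem.List.pyGetD_natCast, List.getD]
      rw [hfun]
      rw [pv_foldl_set_append _ _ _ (by simp; omega)]
      apply List.ext_getElem
      · simp [hE]
      · intro j hj1 hj2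
        have hjq : j < qN := by simpa [hE] using hj2
        rw [List.getElem_mapIdx]
        simp only [hE, List.getElem_map, List.getElem_range, Function.comp_apply]
        have hc1 : ((j * sN : Nat) : Int) = ((j : Nat) : Int) * (sN : Int) := by push_cast; ring
        have hfit : j * sN + sN ≤ n := by
          have : (j + 1) * sN ≤ qN * sN := Nat.mul_le_mul_right _ (by omega)
          calc j * sN + sN = (j + 1) * sN := by ring
            _ ≤ qN * sN := this
            _ = sN * qN := Nat.mul_comm _ _
            _ ≤ n := by omega
        have hslice : PySem.List.slice names (some ((j * sN : Nat) : Int))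
            (some (((j * sN : Nat) : Int) + (sN : Int)))
            = (names.drop (j * sN)).take sN := by
          rw [show ((j * sN : Nat) : Int) + (sN : Int) = ((j * sN + sN : Nat) : Int) by push_cast; ring]
          rw [PySem.List.slice_natCast]
          congr 1
          omega
        rw [hslice]
        by_cases hjr : j < rN
        · rw [if_pos hjr, if_pos hjr]
          rw [show n - rN + j = sN * qN + j by omega]
        · rw [if_neg hjr, if_neg hjr, List.append_nil]
    -- ===== B's single-pass dispatch equals E =====
    have hB : ((PySem.List.enumerate names 0).foldl (fun gs p =>
          let g := if p.1 < (n : Int) - (rN : Int) then PySem.Int.floordiv p.1 (sN : Int)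
                   else p.1 - ((n : Int) - (rN : Int))
          PySem.List.pySetD gs g (PySem.List.pyGetD gs g [] ++ [p.2]))
        ((PySem.List.pyRange 0 (PySem.Int.floordiv ((n : Int) - (rN : Int)) (sN : Int)) 1).map
          (fun _ => ([] : List String)))) = E := by
      rw [hsub, PySem.Int.floordiv_natCast, hq]
      rw [show PySem.List.pyRange 0 ((qN : Nat) : Int) 1
            = (List.range qN).map (fun k => ((k : Nat) : Int)) from PySem.List.pyRange_zero_nat qN]
      rw [List.map_map, henum]
      rw [show PySem.List.pyRange 0 ((n : Nat) : Int) 1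
            = (List.range n).map (fun k => ((k : Nat) : Int)) from PySem.List.pyRange_zero_nat n]
      rw [List.map_map, List.foldl_map]
      -- the dispatch function, over Nat indices
      have hfun : (fun (gs : List (List String)) (k : Nat) =>
          (fun gs (p : Int × String) =>
            let g := if p.1 < ((n - rN : Nat) : Int) then PySem.Int.floordiv p.1 (sN : Int)
                     else p.1 - ((n - rN : Nat) : Int)
            PySem.List.pySetD gs g (PySem.List.pyGetD gs g [] ++ [p.2])) gs
            (((fun j => (j, PySem.List.pyGetD names j "")) ∘ (fun k : Nat => ((k : Nat) : Int))) k))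
          = fun gs k =>
              gs.set (if k < n - rN then k / sN else k - (n - rN))
                ((gs.getD (if k < n - rN then k / sN else k - (n - rN)) []) ++
                  [names.getD k ""]) := by
        funext gs k
        simp only [Function.comp_apply]
        by_cases hk : k < n - rN
        · rw [if_pos (by exact_mod_cast hk : ((k : Nat) : Int) < ((n - rN : Nat) : Int)), if_pos hk,
            PySem.Int.floordiv_natCast]
          simp only [PySem.List.pySetD_natCast, PySem.List.pyGetD_natCast, List.getD]
        · rw [if_neg (by exact_mod_cast hk : ¬ ((k : Nat) : Int) < ((n - rN : Nat) : Int)),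
            if_neg hk,
            show ((k : Nat) : Int) - ((n - rN : Nat) : Int) = ((k - (n - rN) : Nat) : Int) by omega]
          simp only [PySem.List.pySetD_natCast, PySem.List.pyGetD_natCast, List.getD]
      rw [hfun]
      set t : Nat → Nat := fun k => if k < n - rN then k / sN else k - (n - rN) with htdef
      rw [pv_foldl_dispatch t (fun k => names.getD k "") n _ (by
        intro j hj
        simp only [htdef, List.length_map, List.length_range]
        by_cases hjb : j < n - rN
        · rw [if_pos hjb]
          exact (Nat.div_lt_iff_lt_mul hs).mpr (by rw [Nat.mul_comm qN sN]; omega)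
        · rw [if_neg hjb]
          omega)]
      apply List.ext_getElem
      · simp [hE]
      · intro i hi1 hi2
        rw [List.getElem_mapIdx]
        simp only [hE, List.getElem_map, List.getElem_range]
        have hiq : i < qN := by simp at hi1; omega
        -- characterise the bucket of index i
        have hfil : (List.range n).filter (fun j => t j == i)
            = (List.range sN).map (fun k => i * sN + k) ++ (if i < rN then [sN * qN + i] else []) := by
          rw [show n = sN * qN + rN by omega, List.range_add, List.filter_append, List.filter_map]
          congr 1
          · rw [List.filter_congr (fun j hj => by
              have hj' : j < sN * qN := List.mem_range.mp hj
              simp only [htdef]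
              rw [if_pos (by omega)])]
            exact pv_filter_div sN qN i hs hiq
          · rw [List.filter_congr (q := fun k => k == i) (fun k hk => by
              simp only [Function.comp_apply, htdef]
              rw [if_neg (by omega), show sN * qN + k - (n - rN) = k by omega])]
            rw [pv_filter_eq]
            by_cases hir : i < rN
            · rw [if_pos hir, if_pos hir]
              simp
            · rw [if_neg hir, if_neg hir]
              simp
        rw [hfil, List.map_append]
        simp only [Function.comp_apply, List.nil_append]
        congr 1
        · rw [List.map_map]
          have hfit : i * sN + sN ≤ n := by
            have : (i + 1) * sN ≤ qN * sN := Nat.mul_le_mul_right _ (by omega)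
            calc i * sN + sN = (i + 1) * sN := by ring
              _ ≤ qN * sN := this
              _ = sN * qN := Nat.mul_comm _ _
              _ ≤ n := by omega
          rw [← pv_map_getD_take names (i * sN) sN (hn ▸ hfit)]
          apply List.map_congr_left
          intro k _
          rfl
        · by_cases hir : i < rN <;> simp [hir]
    simp only at hA hB
    rw [hA, hB]
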